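-- pv_equiv track=rewrite | github.com/ericjardon/python-coding-problems | UNSTRUCTURED/CP-Python/CodeJam/Vestigium.py | vestigium
-- ===== SOURCE A (Python) =====
-- def vestigium(matrix, N):
--     # Compute trace
--     k = 0
--     for i in range(N):
--         k += matrix[i][i]
--     # Count rows and cols with repeated elems
--     repRows = set()
--     repCols = set()
--     rowVals = {}    # key is digit, val is boolean 'seen'
--     colVals = {}
--     for idx in range(N):
--         rowVals[idx] = set()    # digits seen in the row at idx
--         colVals[idx] = set()    # digits seen in the column at idx
--
--     for i in range(N):      # for every row
--         for j in range(N):      # for every col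
--             val = matrix[i][j]
--             if val in rowVals[i]:   # if the value is already present add the row to repeated rows
--                 repRows.add(i)
--             else:
--                 rowVals[i].add(val) # if not, add the value to the visited digits in ith row
--             if val in colVals[j]:
--                 repCols.add(j)
--             else:
--                 colVals[j].add(val)
--
--     return k, len(repRows), len(repCols)
-- ===== SOURCE B (Python) =====
-- def vestigium(matrix, N):
--     k = sum(matrix[i][i] for i in range(N))
--     r = sum(1 for i in range(N) if len({matrix[i][j] for j in range(N)}) != N)
--     c = sum(1 for j in range(N) if len({matrix[i][j] for i in range(N)}) != N)
--     return k, r, c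
-- ===== Notes on version B (the rewrite author's own statement) =====
-- stated objective: simpler
-- what changed: A's single interleaved pass maintaining per-row/per-column seen-sets in dicts plus collision index-sets is replaced by three independent passes: the trace as a direct sum, and a row/column counted as repeated iff the cardinality of its value set differs from N.
import Mathlib
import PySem

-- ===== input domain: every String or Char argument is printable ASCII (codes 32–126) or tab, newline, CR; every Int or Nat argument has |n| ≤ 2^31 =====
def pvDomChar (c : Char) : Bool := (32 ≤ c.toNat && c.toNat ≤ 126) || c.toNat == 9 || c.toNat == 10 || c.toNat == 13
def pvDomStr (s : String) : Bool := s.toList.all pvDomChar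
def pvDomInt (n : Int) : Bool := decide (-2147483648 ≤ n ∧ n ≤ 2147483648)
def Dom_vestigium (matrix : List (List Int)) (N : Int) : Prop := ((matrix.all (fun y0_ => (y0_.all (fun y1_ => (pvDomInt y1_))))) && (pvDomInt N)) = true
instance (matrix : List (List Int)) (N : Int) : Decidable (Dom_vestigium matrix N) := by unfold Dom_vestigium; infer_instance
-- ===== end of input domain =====

-- B replaces A's interleaved pass with its mutable seen-sets and collision sets by three
-- independent cardinality passes (trace sum; a row/column is "repeated" iff its value set
-- has fewer than N elements); same O(N^2) cost, simpler code.

-- ===== PORT A =====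
-- the body of A's inner loop, row half: 'if val in rowVals[i]: repRows.add(i) else: rowVals[i].add(val)'
-- (rowVals[i] is read with default ∅; under Pre_ the key i is always present, so this is exact)
def vgRowStep (matrix : List (List Int)) (i : Int)
    (s : PySem.Set Int × PySem.Dict Int (PySem.Set Int)) (j : Int) :
    PySem.Set Int × PySem.Dict Int (PySem.Set Int) :=
  let val := PySem.List.pyGetD (PySem.List.pyGetD matrix i []) j 0
  if (s.2.getD i PySem.Set.empty).contains val then (PySem.Set.add s.1 i, s.2)
  else (s.1, s.2.insert i (PySem.Set.add (s.2.getD i PySem.Set.empty) val))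

-- the body of A's inner loop, column half (same shape, keyed by j)
def vgColStep (matrix : List (List Int)) (i : Int)
    (s : PySem.Set Int × PySem.Dict Int (PySem.Set Int)) (j : Int) :
    PySem.Set Int × PySem.Dict Int (PySem.Set Int) :=
  let val := PySem.List.pyGetD (PySem.List.pyGetD matrix i []) j 0
  if (s.2.getD j PySem.Set.empty).contains val then (PySem.Set.add s.1 j, s.2)
  else (s.1, s.2.insert j (PySem.Set.add (s.2.getD j PySem.Set.empty) val))

def vestigium (matrix : List (List Int)) (N : Int) : Int × Int × Int :=
  -- k = 0; for i in range(N): k += matrix[i][i]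
  let k : Int := (PySem.List.pyRange 0 N).foldl
    (fun k i => k + PySem.List.pyGetD (PySem.List.pyGetD matrix i []) i 0) 0
  -- for idx in range(N): rowVals[idx] = set(); colVals[idx] = set()
  let dicts := (PySem.List.pyRange 0 N).foldl
    (fun dc idx => (dc.1.insert idx PySem.Set.empty, dc.2.insert idx PySem.Set.empty))
    ((PySem.Dict.empty : PySem.Dict Int (PySem.Set Int)),
     (PySem.Dict.empty : PySem.Dict Int (PySem.Set Int)))
  -- the nested loop; state = ((repRows, rowVals), (repCols, colVals))
  let st := (PySem.List.pyRange 0 N).foldl (fun st i =>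
      (PySem.List.pyRange 0 N).foldl
        (fun s j => (vgRowStep matrix i s.1 j, vgColStep matrix i s.2 j)) st)
    ((PySem.Set.empty, dicts.1), (PySem.Set.empty, dicts.2))
  (k, PySem.Set.len st.1.1, PySem.Set.len st.2.1)

-- ===== PORT B =====
def vestigium_alt (matrix : List (List Int)) (N : Int) : Int × Int × Int :=
  -- k = sum(matrix[i][i] for i in range(N))
  let k : Int := ((PySem.List.pyRange 0 N).map
      (fun i => PySem.List.pyGetD (PySem.List.pyGetD matrix i []) i 0)).sum
  -- r = sum(1 for i in range(N) if len({matrix[i][j] for j in range(N)}) != N)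
  let r : Int := ((PySem.List.pyRange 0 N).map (fun i =>
      if PySem.Set.len (PySem.Set.ofList ((PySem.List.pyRange 0 N).map (fun j =>
          PySem.List.pyGetD (PySem.List.pyGetD matrix i []) j 0))) ≠ N
      then (1 : Int) else 0)).sum
  -- c = sum(1 for j in range(N) if len({matrix[i][j] for i in range(N)}) != N)
  let c : Int := ((PySem.List.pyRange 0 N).map (fun j =>
      if PySem.Set.len (PySem.Set.ofList ((PySem.List.pyRange 0 N).map (fun i =>
          PySem.List.pyGetD (PySem.List.pyGetD matrix i []) j 0))) ≠ N
      then (1 : Int) else 0)).sum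
  (k, r, c)

-- ===== PRECONDITION & SPEC =====
-- exactly the inputs on which Python A returns: every access matrix[i][j], 0 ≤ i,j < N, is in range
def Pre_vestigium (matrix : List (List Int)) (N : Int) : Prop :=
  N ≤ (matrix.length : Int) ∧ ∀ row ∈ matrix.take N.toNat, N ≤ (row.length : Int)
instance (matrix : List (List Int)) (N : Int) : Decidable (Pre_vestigium matrix N) := by
  unfold Pre_vestigium; infer_instance

def pvWitness_vestigium : List (List Int) × Int := ([[1, 2], [3, 1]], 2)

def Spec_vestigium (matrix : List (List Int)) (N : Int) (out : Int × Int × Int) : Prop := out = vestigium_alt matrix N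
instance (matrix : List (List Int)) (N : Int) (out : Int × Int × Int) : Decidable (Spec_vestigium matrix N out) := by unfold Spec_vestigium; infer_instance

-- ===== CLAIM (what is proved, stated in full; the proofs are below) =====
def Claim_equal_vestigium : Prop := ∀ (matrix : List (List Int)) (N : Int), Dom_vestigium matrix N → Pre_vestigium matrix N → Spec_vestigium matrix N (vestigium matrix N)

-- ===== LEMMAS AND PROOFS =====

-- the matrix entry both ports read (total form; default never used inside Pre_'s range)
def pvV (matrix : List (List Int)) (i j : Int) : Int :=
  PySem.List.pyGetD (PySem.List.pyGetD matrix i []) j 0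

-- splitting the nested fold over the product state into its two independent halves
lemma vg_split (mat : List (List Int)) (is js : List Int)
    (a b : PySem.Set Int × PySem.Dict Int (PySem.Set Int)) :
    is.foldl (fun st i => js.foldl
        (fun s j => (vgRowStep mat i s.1 j, vgColStep mat i s.2 j)) st) (a, b)
      = (is.foldl (fun s i => js.foldl (vgRowStep mat i) s) a,
         is.foldl (fun s i => js.foldl (vgColStep mat i) s) b) := by
  induction is generalizing a b with
  | nil => rfl
  | cons i₀ is ih =>
      simp only [List.foldl_cons, PySem.List.foldl_prod_mk, ih]

-- the dict built by the initialisation loop maps every key to ∅ under getD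
lemma vg_getD_init (ks : List Int) (d : PySem.Dict Int (PySem.Set Int))
    (h : ∀ k, d.getD k PySem.Set.empty = PySem.Set.empty) (k : Int) :
    (ks.foldl (fun d idx => d.insert idx PySem.Set.empty) d).getD k PySem.Set.empty
      = PySem.Set.empty := by
  induction ks generalizing d with
  | nil => exact h k
  | cons k₀ ks ih =>
      refine ih _ (fun k' => ?_)
      rw [PySem.Dict.getD_insert]
      split
      · rfl
      · exact h k'

-- A's inner loop, row half: detects a duplicate among S ++ row values, dict key i becomes S.update vals
lemma vg_row_inner (mat : List (List Int)) (i : Int) (js : List Int)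
    (R : PySem.Set Int) (d : PySem.Dict Int (PySem.Set Int)) (S : PySem.Set Int)
    (hS : d.getD i PySem.Set.empty = S) (hnd : S.Nodup) :
    (js.foldl (vgRowStep mat i) (R, d)).1
      = (if (S ++ js.map (fun j => pvV mat i j)).Nodup then R else PySem.Set.add R i)
    ∧ ∀ k, (js.foldl (vgRowStep mat i) (R, d)).2.getD k PySem.Set.empty
      = if k = i then PySem.Set.update S (js.map (fun j => pvV mat i j))
        else d.getD k PySem.Set.empty := by
  induction js generalizing R d S with
  | nil =>
      refine ⟨by simp [hnd], fun k => ?_⟩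
      by_cases hk : k = i
      · subst hk; simpa [PySem.Set.update] using hS
      · simp [hk]
  | cons j₀ js ih =>
      simp only [List.foldl_cons, List.map_cons]
      by_cases hc : (d.getD i PySem.Set.empty).contains (pvV mat i j₀)
      · have hw : pvV mat i j₀ ∈ S := by
          rw [← hS]; exact (PySem.Set.contains_iff _ _).1 hc
        have hstep : vgRowStep mat i (R, d) j₀ = (PySem.Set.add R i, d) := by
          unfold vgRowStep; dsimp only
          rw [if_pos (by simpa [pvV] using hc)]
        obtain ⟨ih1, ih2⟩ := ih (PySem.Set.add R i) d S hS hnd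
        have hnod : ¬ (S ++ pvV mat i j₀ :: js.map (fun j => pvV mat i j)).Nodup := by
          intro hn
          exact List.disjoint_of_nodup_append hn hw (by simp)
        refine ⟨?_, ?_⟩
        · rw [hstep, ih1, if_neg hnod]
          split
          · rfl
          · exact PySem.Set.add_of_mem ((PySem.Set.mem_add R i i).2 (Or.inr rfl))
        · intro k
          rw [hstep, ih2 k]
          by_cases hk : k = i
          · subst hk
            simp only [if_pos]
            have : PySem.Set.update S (pvV mat k j₀ :: js.map (fun j => pvV mat k j))
                = PySem.Set.update (PySem.Set.add S (pvV mat k j₀)) (js.map (fun j => pvV mat k j)) := rfl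
            rw [this, PySem.Set.add_of_mem hw]
          · simp [hk]
      · have hw : pvV mat i j₀ ∉ S := by
          rw [← hS]; intro hmem
          exact hc ((PySem.Set.contains_iff _ _).2 hmem)
        have hstep : vgRowStep mat i (R, d) j₀
            = (R, d.insert i (PySem.Set.add S (pvV mat i j₀))) := by
          unfold vgRowStep; dsimp only
          rw [if_neg (by simpa [pvV] using hc), hS]; rfl
        have hS' : (d.insert i (PySem.Set.add S (pvV mat i j₀))).getD i PySem.Set.empty
            = PySem.Set.add S (pvV mat i j₀) := by
          rw [PySem.Dict.getD_insert]; simp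
        have hnd' : (PySem.Set.add S (pvV mat i j₀)).Nodup := PySem.Set.nodup_add S _ hnd
        obtain ⟨ih1, ih2⟩ := ih R _ (PySem.Set.add S (pvV mat i j₀)) hS' hnd'
        have hsw : PySem.Set.add S (pvV mat i j₀) = S ++ [pvV mat i j₀] :=
          PySem.Set.add_of_not_mem hw
        refine ⟨?_, ?_⟩
        · rw [hstep, ih1, hsw]
          rw [← List.append_cons]
          rfl
        · intro k
          rw [hstep, ih2 k]
          by_cases hk : k = i
          · subst hk; simp only [if_pos]; rfl
          · simp only [if_neg hk]
            rw [PySem.Dict.getD_insert, if_neg hk]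

-- A's outer loop, row half: repRows collects, in order, the rows with a duplicate
lemma vg_row_outer (mat : List (List Int)) (js : List Int) (is : List Int) (hnd : is.Nodup)
    (R : PySem.Set Int) (d : PySem.Dict Int (PySem.Set Int))
    (hd : ∀ i ∈ is, d.getD i PySem.Set.empty = PySem.Set.empty)
    (hR : ∀ i ∈ is, i ∉ R) :
    (is.foldl (fun s i => js.foldl (vgRowStep mat i) s) (R, d)).1
      = R ++ is.filter (fun i => !decide ((js.map (fun j => pvV mat i j)).Nodup)) := by
  induction is generalizing R d with
  | nil => simp
  | cons i₀ is ih =>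
      obtain ⟨h0, hnd2⟩ := List.nodup_cons.mp hnd
      obtain ⟨g1, g2⟩ := vg_row_inner mat i₀ js R d PySem.Set.empty
        (hd i₀ List.mem_cons_self) List.nodup_nil
      rw [List.foldl_cons]
      have heta : List.foldl (vgRowStep mat i₀) (R, d) js
          = ((List.foldl (vgRowStep mat i₀) (R, d) js).1,
             (List.foldl (vgRowStep mat i₀) (R, d) js).2) := rfl
      rw [heta, ih hnd2 _ _ ?hd ?hR]
      case hd =>
        intro i hi
        rw [g2 i, if_neg (by intro h; subst h; exact h0 hi)]
        exact hd i (List.mem_cons_of_mem _ hi)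
      case hR =>
        intro i hi
        rw [g1]
        split
        · exact hR i (List.mem_cons_of_mem _ hi)
        · intro hmem
          rcases (PySem.Set.mem_add R i₀ i).1 hmem with h | h
          · exact hR i (List.mem_cons_of_mem _ hi) h
          · subst h; exact h0 hi
      rw [g1, List.filter_cons]
      have hcond : List.Nodup (PySem.Set.empty ++ List.map (fun j => pvV mat i₀ j) js)
          ↔ (List.map (fun j => pvV mat i₀ j) js).Nodup := by simp [PySem.Set.empty]
      by_cases hdup : (js.map (fun j => pvV mat i₀ j)).Nodup
      · rw [if_pos (hcond.2 hdup)]; simp [hdup]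
      · rw [if_neg (fun h => hdup (hcond.1 h)),
            PySem.Set.add_of_not_mem (hR i₀ List.mem_cons_self)]
        simp [hdup, List.append_assoc]

-- A's inner loop, column half: each key j is touched exactly once
lemma vg_col_inner (mat : List (List Int)) (i : Int) (js : List Int) (hnd : js.Nodup)
    (C : PySem.Set Int) (d : PySem.Dict Int (PySem.Set Int)) :
    ((js.foldl (vgColStep mat i) (C, d)).1
       = js.foldl (fun c j =>
           if (d.getD j PySem.Set.empty).contains (pvV mat i j) then PySem.Set.add c j else c) C)
    ∧ ∀ k, (js.foldl (vgColStep mat i) (C, d)).2.getD k PySem.Set.empty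
       = if k ∈ js then PySem.Set.add (d.getD k PySem.Set.empty) (pvV mat i k)
         else d.getD k PySem.Set.empty := by
  induction js generalizing C d with
  | nil => exact ⟨rfl, fun k => by simp⟩
  | cons j₀ js ih =>
      obtain ⟨h0, hnd2⟩ := List.nodup_cons.mp hnd
      by_cases hc : (d.getD j₀ PySem.Set.empty).contains (pvV mat i j₀)
      · have hstep : vgColStep mat i (C, d) j₀ = (PySem.Set.add C j₀, d) := by
          unfold vgColStep; dsimp only
          rw [if_pos (by simpa [pvV] using hc)]
        obtain ⟨ih1, ih2⟩ := ih hnd2 (PySem.Set.add C j₀) d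
        refine ⟨?_, ?_⟩
        · rw [List.foldl_cons, hstep, ih1, List.foldl_cons, if_pos hc]
        · intro k
          rw [List.foldl_cons, hstep, ih2 k]
          by_cases hk : k = j₀
          · subst hk
            rw [if_neg (by simpa using h0), if_pos (List.mem_cons_self),
                PySem.Set.add_of_mem ((PySem.Set.contains_iff _ _).1 hc)]
          · by_cases hk2 : k ∈ js
            · rw [if_pos hk2, if_pos (List.mem_cons_of_mem _ hk2)]
            · rw [if_neg hk2, if_neg (by simp [hk, hk2])]
      · have hstep : vgColStep mat i (C, d) j₀
            = (C, d.insert j₀ (PySem.Set.add (d.getD j₀ PySem.Set.empty) (pvV mat i j₀))) := by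
          unfold vgColStep; dsimp only
          rw [if_neg (by simpa [pvV] using hc)]; rfl
        obtain ⟨ih1, ih2⟩ :=
          ih hnd2 C (d.insert j₀ (PySem.Set.add (d.getD j₀ PySem.Set.empty) (pvV mat i j₀)))
        have hgetD : ∀ j ∈ js,
            (d.insert j₀ (PySem.Set.add (d.getD j₀ PySem.Set.empty) (pvV mat i j₀))).getD j
              PySem.Set.empty = d.getD j PySem.Set.empty := by
          intro j hj
          rw [PySem.Dict.getD_insert, if_neg (by intro h; subst h; exact h0 hj)]
        refine ⟨?_, ?_⟩
        · rw [List.foldl_cons, hstep, ih1, List.foldl_cons, if_neg hc]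
          exact PySem.List.foldl_congr_mem _ _ _ _ (fun acc j hj => by rw [hgetD j hj])
        · intro k
          rw [List.foldl_cons, hstep, ih2 k]
          by_cases hk : k = j₀
          · subst hk
            rw [if_neg (by simpa using h0), if_pos (List.mem_cons_self),
                PySem.Dict.getD_insert, if_pos rfl]
          · by_cases hk2 : k ∈ js
            · rw [if_pos hk2, if_pos (List.mem_cons_of_mem _ hk2), hgetD k hk2]
            · rw [if_neg hk2, if_neg (by simp [hk, hk2]),
                  PySem.Dict.getD_insert, if_neg hk]

-- membership in an "add j if q j" fold
lemma vg_mem_addIf (js : List Int) (q : Int → Bool) (C : PySem.Set Int) (x : Int) :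
    x ∈ js.foldl (fun c j => if q j then PySem.Set.add c j else c) C
      ↔ x ∈ C ∨ (x ∈ js ∧ q x) := by
  induction js generalizing C with
  | nil => simp
  | cons j₀ js ih =>
      simp only [List.foldl_cons, List.mem_cons]
      by_cases h : q j₀
      · rw [if_pos h, ih]
        constructor
        · rintro (hC | hjs)
          · rcases (PySem.Set.mem_add C j₀ x).1 hC with h1 | h1
            · exact Or.inl h1
            · exact Or.inr ⟨Or.inl h1, h1 ▸ h⟩
          · exact Or.inr ⟨Or.inr hjs.1, hjs.2⟩
        · rintro (hC | ⟨(rfl | hjs), hq⟩)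
          · exact Or.inl ((PySem.Set.mem_add C j₀ x).2 (Or.inl hC))
          · exact Or.inl ((PySem.Set.mem_add C x x).2 (Or.inr rfl))
          · exact Or.inr ⟨hjs, hq⟩
      · rw [if_neg h, ih]
        constructor
        · rintro (hC | hjs)
          exacts [Or.inl hC, Or.inr ⟨Or.inr hjs.1, hjs.2⟩]
        · rintro (hC | ⟨(rfl | hjs), hq⟩)
          · exact Or.inl hC
          · exact absurd hq (by simp [h])
          · exact Or.inr ⟨hjs, hq⟩

lemma vg_nodup_addIf (js : List Int) (q : Int → Bool) (C : PySem.Set Int) (h : C.Nodup) :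
    (js.foldl (fun c j => if q j then PySem.Set.add c j else c) C).Nodup := by
  induction js generalizing C with
  | nil => exact h
  | cons j₀ js ih =>
      by_cases hq : q j₀ <;> simp [List.foldl_cons, hq]
      · exact ih _ (PySem.Set.nodup_add C j₀ h)
      · exact ih _ h

-- A's outer loop, column half: invariant over the processed column prefixes P
lemma vg_col_outer (mat : List (List Int)) (js : List Int) (hjs : js.Nodup) (is : List Int)
    (C : PySem.Set Int) (d : PySem.Dict Int (PySem.Set Int)) (P : Int → List Int)
    (hd : ∀ j ∈ js, d.getD j PySem.Set.empty = PySem.Set.ofList (P j))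
    (hC : ∀ j ∈ js, (j ∈ C ↔ ¬ (P j).Nodup))
    (hdom : ∀ x ∈ C, x ∈ js) (hCnd : C.Nodup) :
    (∀ j ∈ js, (j ∈ (is.foldl (fun s i => js.foldl (vgColStep mat i) s) (C, d)).1
        ↔ ¬ (P j ++ is.map (fun i => pvV mat i j)).Nodup))
    ∧ (∀ x ∈ (is.foldl (fun s i => js.foldl (vgColStep mat i) s) (C, d)).1, x ∈ js)
    ∧ (is.foldl (fun s i => js.foldl (vgColStep mat i) s) (C, d)).1.Nodup := by
  induction is generalizing C d P with
  | nil =>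
      exact ⟨fun j hj => by simpa using hC j hj, hdom, hCnd⟩
  | cons i₀ is ih =>
      obtain ⟨g1, g2⟩ := vg_col_inner mat i₀ js hjs C d
      rw [List.foldl_cons]
      have heta : List.foldl (vgColStep mat i₀) (C, d) js
          = ((List.foldl (vgColStep mat i₀) (C, d) js).1,
             (List.foldl (vgColStep mat i₀) (C, d) js).2) := rfl
      rw [heta]
      have key := ih (List.foldl (vgColStep mat i₀) (C, d) js).1
        (List.foldl (vgColStep mat i₀) (C, d) js).2
        (fun j => P j ++ [pvV mat i₀ j]) ?hd ?hC ?hdom ?hCnd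
      case hd =>
        intro j hj
        rw [g2 j, if_pos hj, hd j hj, ← PySem.Set.ofList_append_singleton]
      case hC =>
        intro j hj
        rw [g1, vg_mem_addIf]
        have hcont : (d.getD j PySem.Set.empty).contains (pvV mat i₀ j) = true
            ↔ pvV mat i₀ j ∈ P j := by
          rw [hd j hj, PySem.Set.contains_iff, PySem.Set.mem_ofList]
        constructor
        · rintro (hmem | ⟨-, hq⟩)
          · intro hn
            exact ((hC j hj).1 hmem) ((List.nodup_append.mp hn).1)
          · intro hn
            exact List.disjoint_of_nodup_append hn (hcont.1 hq) (by simp)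
        · intro hn
          by_cases hP : (P j).Nodup
          · refine Or.inr ⟨hj, hcont.2 ?_⟩
            by_contra hnm
            exact hn (by simp [List.nodup_append, hP]; exact fun a ha h => hnm (h ▸ ha))
          · exact Or.inl ((hC j hj).2 hP)
      case hdom =>
        intro x hx
        rw [g1, vg_mem_addIf] at hx
        rcases hx with hx | hx
        · exact hdom x hx
        · exact hx.1
      case hCnd =>
        rw [g1]; exact vg_nodup_addIf _ _ _ hCnd
      refine ⟨fun j hj => ?_, key.2.1, key.2.2⟩
      rw [key.1 j hj]
      simp

-- a Nodup list characterised by "x ∈ ks ∧ p x" has length (ks.countP p)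
lemma vg_length_eq (ks C : List Int) (p : Int → Bool) (hks : ks.Nodup) (hC : C.Nodup)
    (hmem : ∀ x, x ∈ C ↔ x ∈ ks ∧ p x) : C.length = ks.countP p := by
  have hperm : C.Perm (ks.filter p) := by
    refine List.perm_of_nodup_nodup_toFinset_eq hC (hks.filter p) ?_
    ext x
    simp [List.mem_toFinset, hmem]
  rw [hperm.length_eq, List.countP_eq_length_filter]

-- the PySem set of a list has full length iff the list has no duplicate
lemma vg_ofList_len (l : List Int) : (PySem.Set.ofList l).length = l.length ↔ l.Nodup := by
  constructor
  · intro h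
    have h1 : (PySem.Set.ofList l).length = (PySem.Set.ofList l).toFinset.card :=
      (List.toFinset_card_of_nodup (PySem.Set.nodup_ofList l)).symm
    have h2 : (PySem.Set.ofList l).toFinset = l.toFinset := by
      ext x; simp [List.mem_toFinset, PySem.Set.mem_ofList]
    have h3 : l.toFinset.card = l.dedup.length := List.card_toFinset l
    have h4 : l.dedup.length = l.length := by rw [← h3, ← h2, ← h1, h]
    have h5 : l.dedup = l := List.Sublist.eq_of_length (List.dedup_sublist l) h4
    rw [← h5]; exact l.nodup_dedup
  · intro h; rw [PySem.Set.ofList_eq_self_of_nodup l h]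

-- B's test "len(set) != N" on an N-element list is exactly "some duplicate"
lemma vg_cond_iff (L : List Int) (N : Int) (hlen : L.length = N.toNat) (hN : 0 ≤ N) :
    (PySem.Set.len (PySem.Set.ofList L) ≠ N) ↔ ¬ L.Nodup := by
  have h1 : PySem.Set.len (PySem.Set.ofList L) = ((PySem.Set.ofList L).length : Int) := rfl
  rw [h1, ← vg_ofList_len, hlen]
  omega

-- ===== VERDICT (by name: the statement is the Claim_ definition above) =====
theorem vestigium_spec : Claim_equal_vestigium := by
  intro matrix N _hdom _hpre
  unfold Spec_vestigium vestigium vestigium_alt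
  dsimp only
  have hdicts := PySem.List.foldl_prod_mk
    (fun (d : PySem.Dict Int (PySem.Set Int)) (idx : Int) => d.insert idx PySem.Set.empty)
    (fun (d : PySem.Dict Int (PySem.Set Int)) (idx : Int) => d.insert idx PySem.Set.empty)
    (PySem.List.pyRange 0 N) PySem.Dict.empty PySem.Dict.empty
  rw [vg_split, hdicts]
  have hnd := PySem.List.nodup_pyRange_one 0 N
  have hd1 : ∀ i ∈ PySem.List.pyRange 0 N,
      ((PySem.List.pyRange 0 N).foldl (fun d idx => d.insert idx PySem.Set.empty)
        PySem.Dict.empty).getD i PySem.Set.empty = PySem.Set.empty :=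
    fun i _ => vg_getD_init _ _ (fun _ => rfl) i
  have hlen1 : ∀ (f : Int → Int), ((PySem.List.pyRange 0 N).map f).length = N.toNat := by
    intro f; rw [List.length_map, PySem.List.length_pyRange_one]; simp
  have hNle : ∀ x, x ∈ PySem.List.pyRange 0 N → 0 ≤ N := by
    intro x hx; have := PySem.List.mem_pyRange_one.mp hx; omega
  simp only [Prod.mk.injEq]
  refine ⟨?_, ?_, ?_⟩
  -- trace
  · rw [PySem.List.foldl_add, zero_add]
  -- rows
  · rw [vg_row_outer matrix (PySem.List.pyRange 0 N) (PySem.List.pyRange 0 N) hnd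
        PySem.Set.empty _ hd1 (fun i _ => by simp [PySem.Set.empty])]
    have hcg : ∀ x ∈ PySem.List.pyRange 0 N,
        (if PySem.Set.len (PySem.Set.ofList ((PySem.List.pyRange 0 N).map (fun j =>
            PySem.List.pyGetD (PySem.List.pyGetD matrix x []) j 0))) ≠ N
         then (1 : Int) else 0)
          = (if (fun i => !decide (((PySem.List.pyRange 0 N).map
              (fun j => pvV matrix i j)).Nodup)) x = true then (1 : Int) else 0) := by
      intro x hx
      have hiff := vg_cond_iff ((PySem.List.pyRange 0 N).map (fun j =>
        PySem.List.pyGetD (PySem.List.pyGetD matrix x []) j 0)) N (hlen1 _) (hNle x hx)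
      have hbool : ¬(List.map (fun j => PySem.List.pyGetD (PySem.List.pyGetD matrix x []) j 0)
            (PySem.List.pyRange 0 N)).Nodup
          ↔ ((!decide ((List.map (fun j => pvV matrix x j)
            (PySem.List.pyRange 0 N)).Nodup)) = true) := by simp [pvV]
      rw [if_congr (hiff.trans hbool) rfl rfl]
    rw [List.map_congr_left hcg, PySem.List.sum_map_ite_one_zero]
    simp only [PySem.Set.empty, List.nil_append, PySem.Set.len]
    rw [← List.countP_eq_length_filter]
  -- cols
  · obtain ⟨m1, m2, m3⟩ := vg_col_outer matrix (PySem.List.pyRange 0 N) hnd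
      (PySem.List.pyRange 0 N) PySem.Set.empty _ (fun _ => ([] : List Int))
      (fun j hj => by rw [hd1 j hj]; rfl)
      (fun j _ => by simp [PySem.Set.empty])
      (fun x hx => by simp [PySem.Set.empty] at hx)
      List.nodup_nil
    have hmem : ∀ x, x ∈ ((PySem.List.pyRange 0 N).foldl
        (fun s i => (PySem.List.pyRange 0 N).foldl (vgColStep matrix i) s)
        (PySem.Set.empty, (PySem.List.pyRange 0 N).foldl
          (fun d idx => d.insert idx PySem.Set.empty) PySem.Dict.empty)).1
        ↔ x ∈ PySem.List.pyRange 0 N ∧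
          (!decide (((PySem.List.pyRange 0 N).map (fun i => pvV matrix i x)).Nodup)) = true := by
      intro x
      constructor
      · intro hx
        refine ⟨m2 x hx, ?_⟩
        have := (m1 x (m2 x hx)).1 hx
        simpa using this
      · rintro ⟨hx, hp⟩
        exact (m1 x hx).2 (by simpa using hp)
    have hlen : PySem.Set.len ((PySem.List.pyRange 0 N).foldl
        (fun s i => (PySem.List.pyRange 0 N).foldl (vgColStep matrix i) s)
        (PySem.Set.empty, (PySem.List.pyRange 0 N).foldl
          (fun d idx => d.insert idx PySem.Set.empty) PySem.Dict.empty)).1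
        = ((((PySem.List.pyRange 0 N)).countP (fun x =>
            !decide (((PySem.List.pyRange 0 N).map (fun i => pvV matrix i x)).Nodup)) : Nat) : Int) := by
      have := vg_length_eq (PySem.List.pyRange 0 N) _ _ hnd m3 hmem
      exact congrArg (fun n : Nat => (n : Int)) this
    rw [hlen]
    have hcg : ∀ x ∈ PySem.List.pyRange 0 N,
        (if PySem.Set.len (PySem.Set.ofList ((PySem.List.pyRange 0 N).map (fun i =>
            PySem.List.pyGetD (PySem.List.pyGetD matrix i []) x 0))) ≠ N
         then (1 : Int) else 0)
          = (if (fun j => !decide (((PySem.List.pyRange 0 N).map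
              (fun i => pvV matrix i j)).Nodup)) x = true then (1 : Int) else 0) := by
      intro x hx
      have hiff := vg_cond_iff ((PySem.List.pyRange 0 N).map (fun i =>
        PySem.List.pyGetD (PySem.List.pyGetD matrix i []) x 0)) N (hlen1 _) (hNle x hx)
      have hbool : ¬(List.map (fun i => PySem.List.pyGetD (PySem.List.pyGetD matrix i []) x 0)
            (PySem.List.pyRange 0 N)).Nodup
          ↔ ((!decide ((List.map (fun i => pvV matrix i x)
            (PySem.List.pyRange 0 N)).Nodup)) = true) := by simp [pvV]
      rw [if_congr (hiff.trans hbool) rfl rfl]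
    rw [List.map_congr_left hcg, PySem.List.sum_map_ite_one_zero]
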